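-- pv_equiv track=rewrite | github.com/kypello/Scummpiler | zplane_decoder.py | generate_offset_table
-- ===== SOURCE A (Python) =====
-- def generate_offset_table(stripes):
--     header_length = 8
--     table_length = 2 * len(stripes)
--
--     offset = header_length + table_length
--
--     offset_table = []
--
--     for stripe in stripes:
--         offset_table.append(offset & 0xFF)
--         offset_table.append((offset & 0xFF00) >> 8)
--         offset += len(stripe)
--
--     return offset_table
-- ===== SOURCE B (Python) =====
-- def _offset_bytes(off):
--     return (off & 0xFF, (off & 0xFF00) >> 8)
--
--
-- def generate_offset_table(stripes):
--     lens = [len(s) for s in stripes]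
--     base = 8 + 2 * len(lens)
--     return [b for i in range(len(lens)) for b in _offset_bytes(base + sum(lens[:i]))]
-- ===== Notes on version B (the rewrite author's own statement) =====
-- stated objective: alternative
-- what changed: Replaces A's single interleaved running-offset accumulator loop with a per-index closed form: each offset is computed as base + sum of the lengths of the preceding stripes, and the bytes are emitted by one flat comprehension over the indices.
import Mathlib
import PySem

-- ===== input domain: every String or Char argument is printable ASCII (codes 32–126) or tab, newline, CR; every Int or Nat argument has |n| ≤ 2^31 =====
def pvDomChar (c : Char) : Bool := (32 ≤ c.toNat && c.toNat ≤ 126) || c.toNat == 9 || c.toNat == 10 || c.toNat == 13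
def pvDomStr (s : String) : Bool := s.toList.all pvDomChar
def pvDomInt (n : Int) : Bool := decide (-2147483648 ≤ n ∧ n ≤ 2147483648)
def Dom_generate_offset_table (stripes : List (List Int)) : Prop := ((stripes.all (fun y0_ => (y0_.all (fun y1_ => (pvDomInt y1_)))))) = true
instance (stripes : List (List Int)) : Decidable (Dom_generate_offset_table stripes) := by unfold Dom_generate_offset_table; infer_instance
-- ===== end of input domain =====

-- B computes each offset by a per-index closed form (base + sum of preceding stripe lengths)
-- instead of A's interleaved running accumulator; same return value on every input.

-- ===== PORT A =====
def generate_offset_table (stripes : List (List Int)) : List Int :=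
  let header_length : Int := 8
  let table_length : Int := 2 * (stripes.length : Int)
  (stripes.foldl
    (fun (st : Int × List Int) stripe =>
      (st.1 + (stripe.length : Int),
       st.2 ++ [PySem.Int.band st.1 0xFF, (PySem.Int.band st.1 0xFF00) >>> 8]))
    (header_length + table_length, [])).2

-- ===== PORT B =====
def offsetBytes (off : Int) : List Int :=
  [PySem.Int.band off 0xFF, (PySem.Int.band off 0xFF00) >>> 8]

def generate_offset_table_alt (stripes : List (List Int)) : List Int :=
  let lens : List Int := stripes.map (fun s => (s.length : Int))
  let base : Int := 8 + 2 * (lens.length : Int)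
  (PySem.List.pyRange 0 (lens.length : Int) 1).flatMap
    (fun i => offsetBytes (base + (PySem.List.slice lens none (some i)).sum))

-- ===== PRECONDITION & SPEC =====
def Spec_generate_offset_table (stripes : List (List Int)) (out : List Int) : Prop := out = generate_offset_table_alt stripes
instance (stripes : List (List Int)) (out : List Int) : Decidable (Spec_generate_offset_table stripes out) := by unfold Spec_generate_offset_table; infer_instance

-- ===== CLAIM (what is proved, stated in full; the proofs are below) =====
def Claim_equal_generate_offset_table : Prop := ∀ (stripes : List (List Int)), Dom_generate_offset_table stripes → Spec_generate_offset_table stripes (generate_offset_table stripes)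

-- ===== LEMMAS AND PROOFS =====

/-- The common mathematical shape of both programs: bytes of the running offsets. -/
def specOT (off : Int) : List (List Int) → List Int
  | [] => []
  | s :: rest => offsetBytes off ++ specOT (off + (s.length : Int)) rest

theorem foldlA_eq_specOT (stripes : List (List Int)) (off : Int) (acc : List Int) :
    (stripes.foldl
      (fun (st : Int × List Int) stripe =>
        (st.1 + (stripe.length : Int),
         st.2 ++ [PySem.Int.band st.1 0xFF, (PySem.Int.band st.1 0xFF00) >>> 8]))
      (off, acc)).2 = acc ++ specOT off stripes := by
  induction stripes generalizing off acc with
  | nil => simp [specOT]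
  | cons s rest ih => simp [specOT, ih, offsetBytes]

theorem flatMapB_eq_specOT (stripes : List (List Int)) (base : Int) :
    ((PySem.List.pyRange 0 (stripes.length : Int) 1).flatMap
      (fun i => offsetBytes (base +
        (PySem.List.slice (stripes.map (fun s => (s.length : Int))) none (some i)).sum)))
      = specOT base stripes := by
  induction stripes generalizing base with
  | nil => simp [specOT, PySem.List.pyRange]
  | cons s rest ih =>
    rw [PySem.List.pyRange_zero_natCast, List.length_cons, List.range_succ_eq_map]
    simp only [List.map_cons, List.flatMap_cons, List.map_map, List.flatMap_map, specOT]
    congr 1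
    · simp [offsetBytes, PySem.List.slice]
    · rw [← ih (base + (s.length : Int)), PySem.List.pyRange_zero_natCast, List.flatMap_map]
      apply List.flatMap_congr
      intro k _
      simp only [Function.comp_apply]
      rw [show ((k.succ : Nat) : Int) = (((k + 1 : Nat) : Nat) : Int) from rfl]
      rw [PySem.List.slice_to_natCast, PySem.List.slice_to_natCast, List.take_succ_cons]
      simp only [List.sum_cons]
      congr 1
      ring

-- ===== VERDICT (by name: the statement is the Claim_ definition above) =====
theorem generate_offset_table_spec : Claim_equal_generate_offset_table := by
  intro stripes _
  unfold Spec_generate_offset_table generate_offset_table generate_offset_table_alt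
  simp only [List.length_map]
  rw [foldlA_eq_specOT, flatMapB_eq_specOT]
  simp
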